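-- pv_equiv track=rewrite | github.com/blegloannec/CodeProblems | Kattis/cantor.py | digits3
-- ===== SOURCE A (Python) =====
-- def digits3(p,q):
--     assert 0<=p<=q
--     t = 0
--     seen = {}
--     D = []
--     while p not in seen:
--         seen[p] = t
--         a,p = divmod(3*p,q)
--         D.append(a)
--         t += 1
--     t = seen[p]
--     return D[:t],D[t:]
-- ===== SOURCE B (Python) =====
-- def digits3(p, q):
--     assert 0 <= p <= q
--     # cycle detection on the remainder map r -> 3*r % q, then one rebuild pass
--     # (no dict of seen remainders is kept)
--     y = p
--     for _ in range(q + 1):      # q+1 steps always lands inside the cycle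
--         y = 3 * y % q
--     lam = 1                      # period: first return to y
--     z = 3 * y % q
--     while z != y:
--         z = 3 * z % q
--         lam += 1
--     mu = 0                       # cycle start: first m with x_{m+lam} = x_m
--     r, s = p, p
--     for _ in range(lam):
--         s = 3 * s % q
--     while r != s:
--         r, s = 3 * r % q, 3 * s % q
--         mu += 1
--     digits = []                  # rebuild the first mu+lam digits
--     r = p
--     for _ in range(mu + lam):
--         a, r = divmod(3 * r, q)
--         digits.append(a)
--     return digits[:mu], digits[mu:]
-- ===== Notes on version B (the rewrite author's own statement) =====
-- stated objective: alternative
-- what changed: Replaces the seen-dict memoization with cycle detection on the remainder map r -> 3r mod q: advance q+1 steps into the cycle, find the period by first return, find the cycle start by a parallel walk at distance lambda, then rebuild the digits in one pass; no dictionary of seen remainders is kept.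
import Mathlib
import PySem

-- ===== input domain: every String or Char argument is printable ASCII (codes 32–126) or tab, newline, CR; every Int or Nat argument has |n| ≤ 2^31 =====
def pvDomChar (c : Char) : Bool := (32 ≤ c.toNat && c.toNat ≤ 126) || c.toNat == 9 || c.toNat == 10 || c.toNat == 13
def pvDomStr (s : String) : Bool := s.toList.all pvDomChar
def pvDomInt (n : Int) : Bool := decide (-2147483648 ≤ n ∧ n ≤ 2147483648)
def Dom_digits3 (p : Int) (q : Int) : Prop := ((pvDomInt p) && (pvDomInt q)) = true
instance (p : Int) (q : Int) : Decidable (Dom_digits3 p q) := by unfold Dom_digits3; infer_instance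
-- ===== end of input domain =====

-- B replaces A's seen-dict memoization by cycle detection on the remainder map (find the
-- period and cycle start, then rebuild the digits in one pass); same results, no dictionary.


-- ===== PORT A =====
-- the while loop, on the state (p, t, seen, D); fuel only makes the recursion total —
-- within Pre_ the loop stops after at most q+1 iterations (pigeonhole on remainders)
def digits3Go (q : Int) (p : Int) (t : Int) (seen : PySem.Dict Int Int) (D : List Int) :
    Nat → List Int × List Int
  | 0 => (D, [])                      -- fuel exhausted: unreachable under Pre_
  | fuel + 1 =>
    match seen.get? p with
    | some s => (PySem.List.slice D none (some s), PySem.List.slice D (some s) none)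
    | none =>
      match PySem.Int.divmod? (3 * p) q with
      | none => (D, [])               -- ZeroDivisionError: excluded by Pre_
      | some ap => digits3Go q ap.2 (t + 1) (seen.insert p t) (D ++ [ap.1]) fuel

-- 'assert 0 <= p <= q' raises (AssertionError) outside Pre_; the port just proceeds there
def digits3 (p : Int) (q : Int) : List Int × List Int :=
  digits3Go q p 0 PySem.Dict.empty [] (q.toNat + 2)

-- ===== PORT B =====
-- 'for _ in range(n): y = 3*y % q'
def altIter (q : Int) (y : Int) : Nat → Int
  | 0 => y
  | n + 1 => altIter q (PySem.Int.mod (3 * y) q) n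

-- 'while z != y: z = 3*z % q; lam += 1' (fueled; terminates within the fuel under Pre_)
def altLam (q : Int) (y : Int) (z : Int) (lam : Int) : Nat → Int
  | 0 => lam
  | fuel + 1 => if z ≠ y then altLam q y (PySem.Int.mod (3 * z) q) (lam + 1) fuel else lam

-- 'while r != s: r, s = 3*r % q, 3*s % q; mu += 1'
def altMu (q : Int) (r : Int) (s : Int) (mu : Int) : Nat → Int
  | 0 => mu
  | fuel + 1 =>
    if r ≠ s then altMu q (PySem.Int.mod (3 * r) q) (PySem.Int.mod (3 * s) q) (mu + 1) fuel
    else mu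

-- 'for _ in range(n): a, r = divmod(3*r, q); digits.append(a)'
def altBuild (q : Int) (r : Int) (D : List Int) : Nat → List Int
  | 0 => D
  | n + 1 =>
    match PySem.Int.divmod? (3 * r) q with
    | none => D                       -- ZeroDivisionError: excluded by Pre_
    | some ap => altBuild q ap.2 (D ++ [ap.1]) n

def digits3_alt (p : Int) (q : Int) : List Int × List Int :=
  let y := altIter q p (q + 1).toNat
  let lam := altLam q y (PySem.Int.mod (3 * y) q) 1 (q.toNat + 2)
  let s0 := altIter q p lam.toNat
  let mu := altMu q p s0 0 (q.toNat + 2)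
  let D := altBuild q p [] (mu + lam).toNat
  (PySem.List.slice D none (some mu), PySem.List.slice D (some mu) none)

-- ===== PRECONDITION & SPEC =====
-- Pre_ excludes exactly where the Python A raises: p outside [0, q] (AssertionError)
-- and q = 0 (then p = 0 and divmod(0, 0) raises ZeroDivisionError).
def Pre_digits3 (p : Int) (q : Int) : Prop := 0 ≤ p ∧ p ≤ q ∧ 1 ≤ q
instance (p : Int) (q : Int) : Decidable (Pre_digits3 p q) := by unfold Pre_digits3; infer_instance

def pvWitness_digits3 : Int × Int := (5, 14)

def Spec_digits3 (p : Int) (q : Int) (out : List Int × List Int) : Prop := out = digits3_alt p q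
instance (p : Int) (q : Int) (out : List Int × List Int) : Decidable (Spec_digits3 p q out) := by unfold Spec_digits3; infer_instance

-- ===== CLAIM (what is proved, stated in full; the proofs are below) =====
def Claim_equal_digits3 : Prop := ∀ (p : Int) (q : Int), Dom_digits3 p q → Pre_digits3 p q → Spec_digits3 p q (digits3 p q)

-- ===== LEMMAS AND PROOFS =====

-- the orbit of the remainder map: orb q p n = x_n, the remainder after n steps
def orb (q : Int) (p : Int) : Nat → Int
  | 0 => p
  | n + 1 => PySem.Int.mod (3 * orb q p n) q

-- the n-th base-3 digit produced alongside the orbit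
def dig (q : Int) (p : Int) (n : Nat) : Int := PySem.Int.floordiv (3 * orb q p n) q


-- orbit facts ---------------------------------------------------------------

lemma orb_shift (q p : Int) (n : Nat) :
    orb q p (n + 1) = orb q (PySem.Int.mod (3 * p) q) n := by
  induction n with
  | zero => rfl
  | succ n ih => show PySem.Int.mod (3 * orb q p (n + 1)) q = _; rw [ih]; rfl

lemma altIter_eq (q : Int) (n : Nat) : ∀ p : Int, altIter q p n = orb q p n := by
  induction n with
  | zero => intro p; rfl
  | succ n ih => intro p; rw [altIter, ih, ← orb_shift]

lemma orb_bound (q p : Int) (hq : 0 < q) (n : Nat) (hn : 1 ≤ n) :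
    0 ≤ orb q p n ∧ orb q p n < q := by
  obtain ⟨m, rfl⟩ := Nat.exists_eq_add_of_le hn
  rw [Nat.add_comm 1 m]
  exact ⟨PySem.Int.mod_nonneg _ hq, PySem.Int.mod_lt _ hq⟩

lemma period_propagate (q p : Int) (a c : Nat) (h : orb q p (a + c) = orb q p a) :
    ∀ m, a ≤ m → orb q p (m + c) = orb q p m := by
  intro m hm
  obtain ⟨k, rfl⟩ := Nat.exists_eq_add_of_le hm
  induction k with
  | zero => exact h
  | succ k ih =>
    have e1 : a + (k + 1) + c = (a + k + c) + 1 := by omega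
    have e2 : a + (k + 1) = (a + k) + 1 := by omega
    rw [e1, e2]
    show PySem.Int.mod (3 * orb q p (a + k + c)) q = PySem.Int.mod (3 * orb q p (a + k)) q
    rw [ih (by omega)]

lemma period_mul (q p : Int) (a c : Nat) (h : orb q p (a + c) = orb q p a) :
    ∀ k m, a ≤ m → orb q p (m + k * c) = orb q p m := by
  intro k
  induction k with
  | zero => intro m _; simp
  | succ k ih =>
    intro m hm
    have e : m + (k + 1) * c = (m + k * c) + c := by ring
    rw [e, period_propagate q p a c h (m + k * c) (by omega), ih m hm]

lemma exists_repeat (q p : Int) (hq : 1 ≤ q) :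
    ∃ s t : Nat, 1 ≤ s ∧ s < t ∧ t ≤ q.toNat + 1 ∧ orb q p s = orb q p t := by
  have hmaps : ∀ i ∈ Finset.Icc 1 (q.toNat + 1), orb q p i ∈ Finset.Ico (0 : Int) q := by
    intro i hi
    rw [Finset.mem_Icc] at hi
    have := orb_bound q p (by omega) i hi.1
    rw [Finset.mem_Ico]; exact this
  have hcard : (Finset.Ico (0 : Int) q).card < (Finset.Icc 1 (q.toNat + 1)).card := by
    rw [Int.card_Ico, Nat.card_Icc]; omega
  obtain ⟨i, hi, j, hj, hne, heq⟩ :=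
    Finset.exists_ne_map_eq_of_card_lt_of_maps_to hcard hmaps
  rw [Finset.mem_Icc] at hi hj
  rcases Nat.lt_or_ge i j with h | h
  · exact ⟨i, j, hi.1, h, hj.2, heq⟩
  · exact ⟨j, i, hj.1, by omega, hi.2, heq.symm⟩

-- given minimal period lam (measured at N) and minimal cycle start mu:
-- any repetition orb s = orb t with s < t ≤ N forces mu ≤ s and lam ∣ (t - s)
lemma repeat_ge (q p : Int) (N mu lam : Nat)
    (hlam1 : 1 ≤ lam)
    (hlammin : ∀ j, 1 ≤ j → j < lam → orb q p (N + j) ≠ orb q p N)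
    (hmuper : orb q p (mu + lam) = orb q p mu)
    (hmumin : ∀ m, m < mu → orb q p (m + lam) ≠ orb q p m)
    (hmuN : mu ≤ N)
    (s t : Nat) (hst : s < t) (htN : t ≤ N) (he : orb q p s = orb q p t) :
    mu ≤ s ∧ lam ∣ (t - s) := by
  set d := t - s with hd
  have hd1 : 1 ≤ d := by omega
  have hper_d : orb q p (s + d) = orb q p s := by
    rw [show s + d = t from by omega]; exact he.symm
  have hdvd : lam ∣ d := by
    have hNd : orb q p (N + d) = orb q p N :=
      period_propagate q p s d hper_d N (by omega)
    have hr0 : d % lam = 0 := by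
      by_contra hr
      have hrlt : d % lam < lam := Nat.mod_lt _ (by omega)
      have h1 : orb q p (N + d % lam + d / lam * lam) = orb q p (N + d % lam) :=
        period_mul q p mu lam hmuper (d / lam) (N + d % lam) (by omega)
      have h2 : N + d % lam + d / lam * lam = N + d := by
        have := Nat.mod_add_div' d lam; omega
      rw [h2, hNd] at h1
      exact hlammin (d % lam) (by omega) hrlt h1.symm
    exact Nat.dvd_of_mod_eq_zero hr0
  refine ⟨?_, hdvd⟩
  have hs_lam : orb q p (s + lam) = orb q p s := by
    have e1 : orb q p (s + mu * d) = orb q p s :=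
      period_mul q p s d hper_d mu s le_rfl
    have e2 : orb q p (s + lam + mu * d) = orb q p (s + lam) :=
      period_mul q p s d hper_d mu (s + lam) (by omega)
    have e3 : orb q p (s + mu * d + lam) = orb q p (s + mu * d) := by
      apply period_propagate q p mu lam hmuper
      have : mu * 1 ≤ mu * d := Nat.mul_le_mul_left mu hd1
      omega
    rw [show s + lam + mu * d = s + mu * d + lam from by omega, e3, e1] at e2
    rw [e2]
  by_contra hlt
  exact hmumin s (by omega) hs_lam

lemma orb_inj (q p : Int) (N mu lam : Nat)
    (hlam1 : 1 ≤ lam)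
    (hlammin : ∀ j, 1 ≤ j → j < lam → orb q p (N + j) ≠ orb q p N)
    (hmuper : orb q p (mu + lam) = orb q p mu)
    (hmumin : ∀ m, m < mu → orb q p (m + lam) ≠ orb q p m)
    (hmuN : mu ≤ N) (hmulamN : mu + lam ≤ N)
    (i j : Nat) (hij : i < j) (hj : j < mu + lam) : orb q p i ≠ orb q p j := by
  intro he
  obtain ⟨h1, h2⟩ := repeat_ge q p N mu lam hlam1 hlammin hmuper hmumin hmuN
    i j hij (by omega) he
  have : lam ≤ j - i := Nat.le_of_dvd (by omega) h2
  omega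

-- A-side loop characterisation ----------------------------------------------

def seenD (q p : Int) (k : Nat) : PySem.Dict Int Int :=
  (List.range k).foldl (fun d j => d.insert (orb q p j) (j : Int)) PySem.Dict.empty

def Dlist (q p : Int) (k : Nat) : List Int := (List.range k).map (dig q p)

lemma seenD_succ (q p : Int) (k : Nat) :
    seenD q p (k + 1) = (seenD q p k).insert (orb q p k) (k : Int) := by
  simp [seenD, List.range_succ]

lemma Dlist_succ (q p : Int) (k : Nat) :
    Dlist q p (k + 1) = Dlist q p k ++ [dig q p k] := by
  simp [Dlist, List.range_succ]

lemma get_seenD (q p : Int) (mu lam : Nat)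
    (hinj : ∀ i j, i < j → j < mu + lam → orb q p i ≠ orb q p j) :
    ∀ k, k ≤ mu + lam → ∀ j, j < mu + lam →
      (seenD q p k).get? (orb q p j) = if j < k then some (j : Int) else none := by
  intro k
  induction k with
  | zero => intro _ j _; simp [seenD, PySem.Dict.get?_empty]
  | succ k ih =>
    intro hk j hj
    rw [seenD_succ, PySem.Dict.get?_insert]
    by_cases hjk : j = k
    · subst hjk; simp
    · have hne : orb q p j ≠ orb q p k := by
        rcases Nat.lt_or_ge j k with h | h
        · exact hinj j k h (by omega)
        · exact (hinj k j (by omega) hj).symm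
      rw [if_neg hne, ih (by omega) j hj]
      rcases Nat.lt_or_ge j k with h | h
      · rw [if_pos h, if_pos (by omega)]
      · rw [if_neg (by omega), if_neg (by omega)]

lemma divmod_step (q p : Int) (hq : q ≠ 0) (k : Nat) :
    PySem.Int.divmod? (3 * orb q p k) q = some (dig q p k, orb q p (k + 1)) := by
  simp [PySem.Int.divmod?, hq, PySem.Int.floordiv, PySem.Int.mod, dig, orb]

lemma A_loop (q p : Int) (mu lam : Nat) (hq : q ≠ 0) (hlam1 : 1 ≤ lam)
    (hinj : ∀ i j, i < j → j < mu + lam → orb q p i ≠ orb q p j)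
    (hfin : orb q p (mu + lam) = orb q p mu) :
    ∀ fuel k, k ≤ mu + lam → mu + lam - k < fuel →
      digits3Go q (orb q p k) (k : Int) (seenD q p k) (Dlist q p k) fuel
        = (PySem.List.slice (Dlist q p (mu + lam)) none (some (mu : Int)),
           PySem.List.slice (Dlist q p (mu + lam)) (some (mu : Int)) none) := by
  intro fuel
  induction fuel with
  | zero => intro k _ h; omega
  | succ f ih =>
    intro k hk hf
    by_cases hkend : k = mu + lam
    · subst hkend
      have hget : (seenD q p (mu + lam)).get? (orb q p (mu + lam)) = some (mu : Int) := by
        rw [hfin, get_seenD q p mu lam hinj (mu + lam) le_rfl mu (by omega),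
          if_pos (by omega)]
      rw [digits3Go, hget]
    · have hklt : k < mu + lam := by omega
      have hget : (seenD q p k).get? (orb q p k) = none := by
        rw [get_seenD q p mu lam hinj k (by omega) k hklt, if_neg (by omega)]
      rw [digits3Go, hget, divmod_step q p hq k]
      show digits3Go q (orb q p (k + 1)) ((k : Int) + 1)
          ((seenD q p k).insert (orb q p k) (k : Int)) (Dlist q p k ++ [dig q p k]) f = _
      rw [← seenD_succ, ← Dlist_succ, show ((k : Int) + 1) = ((k + 1 : Nat) : Int) from by push_cast; ring]
      exact ih (k + 1) (by omega) (by omega)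

-- B-side loop characterisations ----------------------------------------------

lemma lam_loop (q p : Int) (N lam : Nat) (hlam1 : 1 ≤ lam)
    (hlamper : orb q p (N + lam) = orb q p N)
    (hlammin : ∀ j, 1 ≤ j → j < lam → orb q p (N + j) ≠ orb q p N) :
    ∀ fuel j, 1 ≤ j → j ≤ lam → lam - j < fuel →
      altLam q (orb q p N) (orb q p (N + j)) (j : Int) fuel = (lam : Int) := by
  intro fuel
  induction fuel with
  | zero => intro j _ _ h; omega
  | succ f ih =>
    intro j hj1 hjlam hf
    by_cases hend : j = lam
    · subst hend
      rw [altLam, if_neg (by simp [hlamper])]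
    · have hne : orb q p (N + j) ≠ orb q p N := hlammin j hj1 (by omega)
      rw [altLam, if_pos hne]
      have hstep : PySem.Int.mod (3 * orb q p (N + j)) q = orb q p (N + (j + 1)) := by
        rw [show N + (j + 1) = (N + j) + 1 from by omega]; rfl
      rw [hstep, show ((j : Int) + 1) = ((j + 1 : Nat) : Int) from by push_cast; ring]
      exact ih (j + 1) (by omega) (by omega) (by omega)

lemma mu_loop (q p : Int) (mu lam : Nat)
    (hmuper : orb q p (mu + lam) = orb q p mu)
    (hmumin : ∀ m, m < mu → orb q p (m + lam) ≠ orb q p m) :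
    ∀ fuel m, m ≤ mu → mu - m < fuel →
      altMu q (orb q p m) (orb q p (m + lam)) (m : Int) fuel = (mu : Int) := by
  intro fuel
  induction fuel with
  | zero => intro m _ h; omega
  | succ f ih =>
    intro m hm hf
    by_cases hend : m = mu
    · subst hend
      rw [altMu, if_neg (by simp [hmuper])]
    · have hne : orb q p m ≠ orb q p (m + lam) := fun h => hmumin m (by omega) h.symm
      rw [altMu, if_pos hne]
      have h1 : PySem.Int.mod (3 * orb q p m) q = orb q p (m + 1) := rfl
      have h2 : PySem.Int.mod (3 * orb q p (m + lam)) q = orb q p ((m + 1) + lam) := by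
        rw [show (m + 1) + lam = (m + lam) + 1 from by omega]; rfl
      rw [h1, h2, show ((m : Int) + 1) = ((m + 1 : Nat) : Int) from by push_cast; ring]
      exact ih (m + 1) (by omega) (by omega)

lemma build_loop (q p : Int) (hq : q ≠ 0) :
    ∀ n k (D : List Int),
      altBuild q (orb q p k) D n = D ++ (List.range n).map (fun i => dig q p (k + i)) := by
  intro n
  induction n with
  | zero => intro k D; simp [altBuild]
  | succ n ih =>
    intro k D
    rw [altBuild, divmod_step q p hq k]
    show altBuild q (orb q p (k + 1)) (D ++ [dig q p k]) n = _
    rw [ih (k + 1) (D ++ [dig q p k]), List.range_succ_eq_map, List.map_cons, List.map_map]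
    simp only [Nat.add_zero, List.append_assoc, List.singleton_append]
    congr 2
    apply List.map_congr_left
    intro i _
    simp only [Function.comp_apply]
    congr 1
    omega

-- main ------------------------------------------------------------------------

-- ===== VERDICT (by name: the statement is the Claim_ definition above) =====
theorem digits3_spec : Claim_equal_digits3 := by
  intro p q _ hpre
  obtain ⟨hp0, hpq, hq⟩ := hpre
  show digits3 p q = digits3_alt p q
  set N := q.toNat + 1 with hN
  -- a repetition exists among the first N+1 remainders
  obtain ⟨s, t, hs1, hst, htN, he⟩ := exists_repeat q p hq
  have hNrep : ∃ j, 1 ≤ j ∧ orb q p (N + j) = orb q p N := by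
    refine ⟨t - s, by omega, ?_⟩
    apply period_propagate q p s (t - s) _ N (by omega)
    rw [show s + (t - s) = t from by omega]; exact he.symm
  -- lam: the minimal period, measured at index N
  set lam := Nat.find hNrep with hlamdef
  obtain ⟨hlam1, hlamper⟩ := Nat.find_spec hNrep
  have hlammin : ∀ j, 1 ≤ j → j < lam → orb q p (N + j) ≠ orb q p N :=
    fun j h1 hlt hne => Nat.find_min hNrep hlt ⟨h1, hne⟩
  -- mu: the minimal cycle start
  have hmuE : ∃ m, orb q p (m + lam) = orb q p m := ⟨N, hlamper⟩
  set mu := Nat.find hmuE with hmudef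
  have hmuper : orb q p (mu + lam) = orb q p mu := Nat.find_spec hmuE
  have hmumin : ∀ m, m < mu → orb q p (m + lam) ≠ orb q p m :=
    fun m hlt => Nat.find_min hmuE hlt
  have hmuN : mu ≤ N := Nat.find_min' hmuE hlamper
  have hrge := repeat_ge q p N mu lam hlam1 hlammin hmuper hmumin hmuN s t hst htN he
  have hmulamN : mu + lam ≤ N := by
    have : lam ≤ t - s := Nat.le_of_dvd (by omega) hrge.2
    omega
  have hlamN : lam ≤ N := by omega
  have hinj := orb_inj q p N mu lam hlam1 hlammin hmuper hmumin hmuN hmulamN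
  have hq0 : q ≠ 0 := by omega
  -- A computes (Dfull[:mu], Dfull[mu:])
  have hA : digits3 p q
      = (PySem.List.slice (Dlist q p (mu + lam)) none (some (mu : Int)),
         PySem.List.slice (Dlist q p (mu + lam)) (some (mu : Int)) none) := by
    have h0 := A_loop q p mu lam hq0 hlam1 hinj hmuper (q.toNat + 2) 0
      (by omega) (by omega)
    simpa [digits3, seenD, Dlist, orb] using h0
  -- B computes the same pair
  have hy : altIter q p (q + 1).toNat = orb q p N := by
    rw [altIter_eq, show (q + 1).toNat = N from by omega]
  have hlamrun : altLam q (orb q p N) (PySem.Int.mod (3 * orb q p N) q) 1 (q.toNat + 2)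
      = (lam : Int) := by
    have h1 : PySem.Int.mod (3 * orb q p N) q = orb q p (N + 1) := rfl
    have h2 := lam_loop q p N lam hlam1 hlamper hlammin (q.toNat + 2) 1
      (by omega) (by omega) (by omega)
    rw [h1]
    simpa using h2
  have hs0 : altIter q p ((lam : Int)).toNat = orb q p lam := by
    rw [altIter_eq, Int.toNat_natCast]
  have hmurun : altMu q p (orb q p lam) 0 (q.toNat + 2) = (mu : Int) := by
    have h2 := mu_loop q p mu lam hmuper hmumin (q.toNat + 2) 0 (by omega) (by omega)
    simpa [orb] using h2
  have hbuild : altBuild q p [] ((mu : Int) + (lam : Int)).toNat = Dlist q p (mu + lam) := by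
    have hcast : ((mu : Int) + (lam : Int)).toNat = mu + lam := by
      rw [show ((mu : Int) + (lam : Int)) = ((mu + lam : Nat) : Int) from by push_cast; ring,
        Int.toNat_natCast]
    rw [hcast]
    have h3 := build_loop q p hq0 (mu + lam) 0 []
    simpa [Dlist, orb] using h3
  rw [hA, digits3_alt]
  simp only [hy, hlamrun, hs0, hmurun, hbuild]
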